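-- pv_equiv track=rewrite | github.com/p-rit/interpolation | interpolation/newton_backward_diff.py | f
-- ===== SOURCE A (Python) =====
-- def f(l1,l2):
-- 	d = [[0 for x in range(len(l1))] for y in range(0,len(l2))]
--
--
-- 	for i in range(0,len(l1)-1):
-- 		for j in range(0,len(l2)-i-1):
-- 			if i==0:
-- 				d[i][j] = l2[j+1]-l2[j]
-- 			else:
-- 				d[i][j] = d[i-1][j+1] - d[i-1][j]
-- 	return d
-- ===== SOURCE B (Python) =====
-- def f(l1, l2):
--     # closed form: cell (i,j) is the (i+1)-th forward difference of l2 at j,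
--     # computed directly as sum_k (-1)^k * C(i+1,k) * l2[j+i+1-k]
--     def cell(i, j):
--         s, c = 0, 1  # c runs through the binomial coefficients C(i+1, k)
--         for k in range(i + 2):
--             s += (c if k % 2 == 0 else -c) * l2[j + i + 1 - k]
--             c = c * (i + 1 - k) // (k + 1)
--         return s
--     return [[cell(i, j) if i < len(l1) - 1 and j < len(l2) - i - 1 else 0
--              for j in range(len(l1))]
--             for i in range(len(l2))]
-- ===== Notes on version B (the rewrite author's own statement) =====
-- stated objective: alternative
-- what changed: B computes every table cell directly by the closed-form binomial expansion of the (i+1)-th forward difference, sum_k (-1)^k*C(i+1,k)*l2[j+i+1-k], instead of building the table row by row from previous differences; no table is read back at all.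
-- outside the precondition, e.g. on f([1, 2], [1, 2, 3, 4]): A raises IndexError, B returns [[1, 1], [0, 0], [0, 0], [0, 0]]
import Mathlib
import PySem

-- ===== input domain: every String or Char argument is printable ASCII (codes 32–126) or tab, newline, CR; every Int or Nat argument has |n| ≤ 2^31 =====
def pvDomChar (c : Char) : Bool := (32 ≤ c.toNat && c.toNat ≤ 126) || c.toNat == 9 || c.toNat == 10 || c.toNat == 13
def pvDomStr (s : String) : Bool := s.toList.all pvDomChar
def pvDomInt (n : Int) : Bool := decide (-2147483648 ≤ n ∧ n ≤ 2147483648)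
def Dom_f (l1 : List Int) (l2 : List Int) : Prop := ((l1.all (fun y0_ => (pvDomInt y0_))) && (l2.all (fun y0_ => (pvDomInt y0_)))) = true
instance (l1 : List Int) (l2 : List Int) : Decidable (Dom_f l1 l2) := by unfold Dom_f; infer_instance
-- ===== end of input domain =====

-- B computes each cell of the backward-difference table directly by the binomial
-- closed form of the (i+1)-th forward difference, instead of A's row-by-row table
-- construction (objective: alternative algorithm; not faster).

-- ===== PORT A =====
-- inner loop of A (the j-loop filling row i), kept as a named helper
def innerA (l2 : List Int) (d : List (List Int)) (i : Int) : List (List Int) :=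
  (PySem.List.pyRange 0 ((l2.length : Int) - i - 1) 1).foldl (fun d j =>
    if i == 0 then
      d.set i.toNat ((d.getD i.toNat []).set j.toNat
        (l2.getD (j.toNat + 1) 0 - l2.getD j.toNat 0))
    else
      d.set i.toNat ((d.getD i.toNat []).set j.toNat
        ((d.getD (i.toNat - 1) []).getD (j.toNat + 1) 0 -
         (d.getD (i.toNat - 1) []).getD j.toNat 0))) d

def f (l1 : List Int) (l2 : List Int) : List (List Int) :=
  let d0 : List (List Int) :=
    (List.range l2.length).map (fun _ => (List.range l1.length).map (fun _ => (0 : Int)))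
  (PySem.List.pyRange 0 ((l1.length : Int) - 1) 1).foldl (innerA l2) d0

-- ===== PORT B =====
-- B's cell(i, j): sum over k of (-1)^k * C(i+1,k) * l2[j+i+1-k], with c the running
-- binomial coefficient; the list index j+i+1-k is in range under f_alt's guard, so
-- getD is exact there.
def cellB (l2 : List Int) (i j : Nat) : Int :=
  ((List.range (i + 2)).foldl (fun (sc : Int × Int) k =>
      (sc.1 + (if k % 2 == 0 then sc.2 else -sc.2) * l2.getD (j + i + 1 - k) 0,
       PySem.Int.floordiv (sc.2 * ((i : Int) + 1 - k)) ((k : Int) + 1)))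
    ((0 : Int), (1 : Int))).1

-- the Nat guards equal Python's int comparisons: i < len(l1)-1 and j < len(l2)-i-1
-- are false exactly when the Nat truncated subtractions make them false
def f_alt (l1 : List Int) (l2 : List Int) : List (List Int) :=
  (List.range l2.length).map (fun i =>
    (List.range l1.length).map (fun j =>
      if i < l1.length - 1 ∧ j < l2.length - i - 1 then cellB l2 i j else 0))

-- ===== PRECONDITION & SPEC =====
-- Pre_ excludes exactly the inputs where A raises IndexError (row writes past the
-- zero table's l1-sized columns): len(l1) ≥ 2 together with len(l2) ≥ len(l1)+2.
def Pre_f (l1 : List Int) (l2 : List Int) : Prop :=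
  l1.length ≤ 1 ∨ l2.length ≤ l1.length + 1
instance (l1 : List Int) (l2 : List Int) : Decidable (Pre_f l1 l2) := by
  unfold Pre_f; infer_instance

def pvWitness_f : List Int × List Int := ([1, 2, 3], [1, 3, 6])

def Spec_f (l1 : List Int) (l2 : List Int) (out : List (List Int)) : Prop := out = f_alt l1 l2
instance (l1 : List Int) (l2 : List Int) (out : List (List Int)) : Decidable (Spec_f l1 l2 out) := by unfold Spec_f; infer_instance

-- ===== CLAIM (what is proved, stated in full; the proofs are below) =====
def Claim_equal_f : Prop := ∀ (l1 : List Int) (l2 : List Int), Dom_f l1 l2 → Pre_f l1 l2 → Spec_f l1 l2 (f l1 l2)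

-- ===== LEMMAS AND PROOFS =====

-- one step of differences
def diffRow (cur : List Int) : List Int :=
  (List.range (cur.length - 1)).map (fun j => cur.getD (j + 1) 0 - cur.getD j 0)

-- k-fold difference of a list
def nthDiff : Nat → List Int → List Int
  | 0, l => l
  | n + 1, l => diffRow (nthDiff n l)

-- row r of the finished table, padded with zeros to width L
def padRow (L : Nat) (l2 : List Int) (r : Nat) : List Int :=
  nthDiff (r + 1) l2 ++ List.replicate (L - (nthDiff (r + 1) l2).length) 0

lemma diffRow_length (l : List Int) : (diffRow l).length = l.length - 1 := by
  simp [diffRow]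

lemma nthDiff_length (k : Nat) (l : List Int) : (nthDiff k l).length = l.length - k := by
  induction k with
  | zero => simp [nthDiff]
  | succ k ih => simp [nthDiff, diffRow_length, ih]; omega

lemma diffRow_getD (l : List Int) (j : Nat) (hj : j < l.length - 1) :
    (diffRow l).getD j 0 = l.getD (j + 1) 0 - l.getD j 0 := by
  simp [diffRow, List.getD, List.getElem?_range hj]

-- the binomial sum B's cell computes
def S (l2 : List Int) (m j : Nat) : Int :=
  ∑ k ∈ Finset.range (m + 1), (-1) ^ k * (m.choose k : Int) * l2.getD (j + m - k) 0

lemma S_succ (l2 : List Int) (m j : Nat) :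
    S l2 (m + 1) j = S l2 m (j + 1) - S l2 m j := by
  have hB : (∑ k ∈ Finset.range (m + 1), (-1 : Int) ^ k * (m.choose (k+1) : Int) * l2.getD (j + m - k) 0)
      = ∑ k ∈ Finset.range m, (-1 : Int) ^ k * (m.choose (k+1) : Int) * l2.getD (j + m - k) 0 := by
    rw [Finset.sum_range_succ]
    simp [Nat.choose_succ_self]
  have hS : S l2 m (j + 1)
      = -(∑ k ∈ Finset.range m, (-1 : Int) ^ k * (m.choose (k+1) : Int) * l2.getD (j + m - k) 0)
        + l2.getD (j + m + 1) 0 := by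
    unfold S
    rw [Finset.sum_range_succ' (fun k => (-1 : Int) ^ k * (m.choose k : Int) * l2.getD (j + 1 + m - k) 0)]
    have hc : ∀ k ∈ Finset.range m,
        (-1 : Int) ^ (k+1) * (m.choose (k+1) : Int) * l2.getD (j + 1 + m - (k+1)) 0
        = -((-1 : Int) ^ k * (m.choose (k+1) : Int) * l2.getD (j + m - k) 0) := by
      intro k hk
      have h2 : j + 1 + m - (k+1) = j + m - k := by omega
      rw [h2]; ring
    rw [Finset.sum_congr rfl hc, Finset.sum_neg_distrib]
    have h0 : j + 1 + m - 0 = j + m + 1 := by omega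
    rw [h0]; simp
  have hL : S l2 (m + 1) j
      = -(S l2 m j)
        + (-(∑ k ∈ Finset.range (m + 1), (-1 : Int) ^ k * (m.choose (k+1) : Int) * l2.getD (j + m - k) 0))
        + l2.getD (j + m + 1) 0 := by
    unfold S
    rw [Finset.sum_range_succ' (fun k => (-1 : Int) ^ k * ((m+1).choose k : Int) * l2.getD (j + (m+1) - k) 0)]
    have hc : ∀ k ∈ Finset.range (m + 1),
        (-1 : Int) ^ (k+1) * ((m+1).choose (k+1) : Int) * l2.getD (j + (m+1) - (k+1)) 0
        = -((-1 : Int) ^ k * (m.choose k : Int) * l2.getD (j + m - k) 0)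
          + -((-1 : Int) ^ k * (m.choose (k+1) : Int) * l2.getD (j + m - k) 0) := by
      intro k _
      have h2 : j + (m+1) - (k+1) = j + m - k := by omega
      rw [h2, Nat.choose_succ_succ]
      push_cast; ring
    rw [Finset.sum_congr rfl hc, Finset.sum_add_distrib, Finset.sum_neg_distrib,
      Finset.sum_neg_distrib]
    have h0 : j + (m+1) - 0 = j + m + 1 := by omega
    rw [h0]
    norm_num
  rw [hL, hS, hB]
  ring

lemma nthDiff_getD_eq_S (l2 : List Int) (m : Nat) :
    ∀ j, j < l2.length - m → (nthDiff m l2).getD j 0 = S l2 m j := by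
  induction m with
  | zero => intro j _; simp [nthDiff, S]
  | succ m ih =>
    intro j hj
    have h1 : j < (nthDiff m l2).length - 1 := by rw [nthDiff_length]; omega
    rw [show nthDiff (m+1) l2 = diffRow (nthDiff m l2) from rfl,
        diffRow_getD _ j h1, ih (j+1) (by omega), ih j (by omega), S_succ]

-- the running-coefficient fold of cellB computes the binomial sum
lemma cellB_fold (l2 : List Int) (i j : Nat) :
    ∀ n, n ≤ i + 2 →
    (List.range n).foldl (fun (sc : Int × Int) k =>
        (sc.1 + (if k % 2 == 0 then sc.2 else -sc.2) * l2.getD (j + i + 1 - k) 0,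
         PySem.Int.floordiv (sc.2 * ((i : Int) + 1 - k)) ((k : Int) + 1)))
      ((0 : Int), (1 : Int))
    = (∑ k ∈ Finset.range n, (-1) ^ k * (((i+1).choose k : Int)) * l2.getD (j + i + 1 - k) 0,
       (((i+1).choose n : Int))) := by
  intro n hn
  induction n with
  | zero => simp
  | succ n ihn =>
    have hn' : n ≤ i + 2 := by omega
    rw [List.range_succ, List.foldl_append, ihn hn']
    simp only [List.foldl_cons, List.foldl_nil]
    rw [Prod.mk.injEq]
    refine ⟨?_, ?_⟩
    · rw [Finset.sum_range_succ]
      have hsign : (if n % 2 == 0 then (((i+1).choose n : Int)) else -(((i+1).choose n : Int)))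
          = (-1) ^ n * (((i+1).choose n : Int)) := by
        by_cases hpar : n % 2 = 0
        · have hp : (-1 : Int) ^ n = 1 := Even.neg_one_pow (Nat.even_iff.2 hpar)
          simp [hpar, hp]
        · have hp : (-1 : Int) ^ n = -1 := Odd.neg_one_pow (Nat.odd_iff.2 (by omega))
          simp [hpar, hp]
      rw [hsign]
    · -- C(i+1,n) * (i+1-n) // (n+1) = C(i+1,n+1)
      have hle : n ≤ i + 1 := by omega
      have hcast : ((i : Int) + 1 - n) = ((i + 1 - n : Nat) : Int) := by omega
      have hch : (i+1).choose (n+1) * (n+1) = (i+1).choose n * (i + 1 - n) :=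
        Nat.choose_succ_right_eq (i+1) n
      have hmul : ((((i+1).choose n : Int)) * ((i : Int) + 1 - n))
          = (((i+1).choose (n+1) : Int)) * ((n : Int) + 1) := by
        rw [hcast, ← Nat.cast_mul, ← hch]
        push_cast; ring
      rw [hmul, PySem.Int.floordiv_eq_ediv_of_pos (by omega),
        Int.mul_ediv_cancel _ (by omega)]

lemma cellB_eq_S (l2 : List Int) (i j : Nat) : cellB l2 i j = S l2 (i+1) j := by
  unfold cellB S
  rw [cellB_fold l2 i j (i + 2) le_rfl]
  dsimp only
  apply Finset.sum_congr rfl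
  intro k hk
  rw [Finset.mem_range] at hk
  have : j + (i + 1) - k = j + i + 1 - k := by omega
  rw [this]

-- B equals the clean table description
lemma f_alt_eq (l1 l2 : List Int) (h : Pre_f l1 l2) :
    f_alt l1 l2 = (List.range l2.length).map (fun r =>
      if r < l1.length - 1 then padRow l1.length l2 r
      else List.replicate l1.length 0) := by
  unfold f_alt
  apply List.map_congr_left
  intro i hi
  rw [List.mem_range] at hi
  by_cases h1 : i < l1.length - 1
  · have hll : l2.length - (i + 1) ≤ l1.length := by
      unfold Pre_f at h; omega
    apply List.ext_getElem
    · simp [padRow, h1, nthDiff_length]; omega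
    · intro j hj1 hj2
      simp only [List.length_map, List.length_range] at hj1
      simp only [List.getElem_map, List.getElem_range, if_pos h1]
      have hlen : (nthDiff (i+1) l2).length = l2.length - (i+1) := nthDiff_length _ _
      by_cases h2 : j < l2.length - i - 1
      · rw [if_pos ⟨h1, h2⟩]
        have hjn : j < (nthDiff (i+1) l2).length := by omega
        rw [cellB_eq_S, ← nthDiff_getD_eq_S l2 (i+1) j (by omega)]
        simp only [padRow]
        rw [List.getElem_append_left hjn]
        simp [List.getD, List.getElem?_eq_getElem hjn]
      · rw [if_neg (by tauto)]
        have hjn : (nthDiff (i+1) l2).length ≤ j := by omega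
        simp only [padRow]
        rw [List.getElem_append_right hjn]
        simp
  · rw [if_neg h1]
    apply List.ext_getElem
    · simp
    · intro j hj1 hj2
      simp only [List.length_map, List.length_range] at hj1
      simp only [List.getElem_map, List.getElem_range, List.getElem_replicate]
      rw [if_neg (by tauto)]

-- `getD` through an append, inside the left part
lemma getD_append_left (a b : List Int) (j : Nat) (hj : j < a.length) :
    (a ++ b).getD j 0 = a.getD j 0 := by
  simp [List.getD, List.getElem?_append_left hj]

-- a row of the partially-filled table
lemma getD_map_range_row (g : Nat → List Int) (n r : Nat) (hr : r < n) :
    ((List.range n).map g).getD r [] = g r := by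
  simp [List.getD, List.getElem?_range hr]

-- generic inner loop: filling row m left to right with values w that ignore row m
lemma fold_set_row (m : Nat) (w : List (List Int) → Nat → Int)
    (hw : ∀ d r j, w (d.set m r) j = w d j)
    (T : List (List Int)) (L : Nat) (hm : m < T.length)
    (hrow : T.getD m [] = List.replicate L 0)
    (c : Nat) (hc : c ≤ L) :
    (List.range c).foldl (fun d j => d.set m ((d.getD m []).set j (w d j))) T
    = T.set m ((List.range L).map (fun j => if j < c then w T j else 0)) := by
  induction c with
  | zero =>
    have h0 : (List.range L).map (fun j => if j < 0 then w T j else (0:Int))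
        = List.replicate L 0 := by
      apply List.ext_getElem <;> simp
    have hT : T.getD m [] = T[m]'hm := by
      simp [List.getD, List.getElem?_eq_getElem hm]
    simp only [List.range_zero, List.foldl_nil, h0, ← hrow, hT]
    exact (List.set_getElem_self (as := T) (i := m) hm).symm
  | succ c ih =>
    have hc' : c ≤ L := by omega
    have hcL : c < L := by omega
    rw [List.range_succ, List.foldl_append, ih hc']
    simp only [List.foldl_cons, List.foldl_nil]
    have hlen : m < (T.set m ((List.range L).map (fun j => if j < c then w T j else 0))).length := by
      simpa using hm
    have h1 : (T.set m ((List.range L).map (fun j => if j < c then w T j else 0))).getD m []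
        = (List.range L).map (fun j => if j < c then w T j else 0) := by
      simp [List.getD, List.getElem?_set_self (show m < T.length from hm)]
    rw [h1, hw, List.set_set]
    congr 1
    apply List.ext_getElem
    · simp
    · intro j hj1 hj2
      rw [List.getElem_set]
      by_cases hjc : j = c
      · subst hjc
        simp
      · simp
        omega

-- the port's inner loop, re-indexed over naturals
lemma innerA_nat (l2 : List Int) (d : List (List Int)) (m : Nat) :
    innerA l2 d (m : Int) =
    (List.range (l2.length - m - 1)).foldl (fun d j =>
      d.set m ((d.getD m []).set j
        ((if m = 0 then l2 else d.getD (m - 1) []).getD (j + 1) 0 -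
         (if m = 0 then l2 else d.getD (m - 1) []).getD j 0))) d := by
  unfold innerA
  rw [PySem.List.pyRange_one]
  have hcast : (((l2.length : Int) - m - 1) - 0).toNat = l2.length - m - 1 := by omega
  rw [hcast, List.foldl_map]
  congr 1
  funext d j
  by_cases hm : m = 0
  · subst hm; simp
  · have hne : ((m : Int) == 0) = false := by
      simp only [beq_eq_false_iff_ne, ne_eq, Int.natCast_eq_zero]
      exact hm
    simp [hne, hm, Int.toNat_natCast]

-- the value written into row m equals the (m+1)-st difference, given the table so far
lemma w_value (l1 l2 : List Int) (m j : Nat) (hm : m < l2.length)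
    (hj : j < l2.length - m - 1) :
    ((if m = 0 then l2 else
        ((List.range l2.length).map (fun r =>
          if r < m then padRow l1.length l2 r
          else List.replicate l1.length 0)).getD (m - 1) []).getD (j + 1) 0 -
     (if m = 0 then l2 else
        ((List.range l2.length).map (fun r =>
          if r < m then padRow l1.length l2 r
          else List.replicate l1.length 0)).getD (m - 1) []).getD j 0)
    = (nthDiff (m + 1) l2).getD j 0 := by
  have hlen : (nthDiff m l2).length = l2.length - m := nthDiff_length m l2
  have hdr : (nthDiff (m + 1) l2).getD j 0
      = (nthDiff m l2).getD (j + 1) 0 - (nthDiff m l2).getD j 0 := by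
    show (diffRow (nthDiff m l2)).getD j 0 = _
    exact diffRow_getD _ j (by omega)
  by_cases hm0 : m = 0
  · subst hm0
    simpa [nthDiff] using hdr.symm
  · have hm1 : m - 1 < l2.length := by omega
    rw [if_neg hm0, getD_map_range_row _ _ _ hm1, if_pos (by omega : m - 1 < m)]
    have hrw : m - 1 + 1 = m := by omega
    simp only [padRow, hrw]
    rw [getD_append_left _ _ (j + 1) (by omega), getD_append_left _ _ j (by omega)]
    exact hdr.symm

-- outer loop invariant for A
lemma f_outer (l1 l2 : List Int) (h : Pre_f l1 l2) :
    ∀ m, m ≤ l1.length - 1 →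
    (List.range m).foldl (fun d (k : Nat) => innerA l2 d (k : Int))
      ((List.range l2.length).map (fun _ => (List.range l1.length).map (fun _ => (0 : Int))))
    = (List.range l2.length).map (fun r =>
        if r < m then padRow l1.length l2 r
        else List.replicate l1.length 0) := by
  intro m hmL
  induction m with
  | zero =>
    simp only [List.range_zero, List.foldl_nil]
    apply List.map_congr_left
    intro r _
    rw [if_neg (by omega)]
    apply List.ext_getElem <;> simp
  | succ m ih =>
    have hm' : m ≤ l1.length - 1 := by omega
    have hL2 : 2 ≤ l1.length := by omega
    have hn : l2.length ≤ l1.length + 1 := by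
      rcases h with h | h
      · omega
      · exact h
    rw [List.range_succ, List.foldl_append, ih hm']
    simp only [List.foldl_cons, List.foldl_nil]
    rw [innerA_nat]
    set T := (List.range l2.length).map (fun r =>
        if r < m then padRow l1.length l2 r
        else List.replicate l1.length 0) with hT
    by_cases hc0 : l2.length - m - 1 = 0
    · -- inner loop is empty; rows r < m and r < m+1 describe the same table
      rw [hc0]
      simp only [List.range_zero, List.foldl_nil, hT]
      apply List.map_congr_left
      intro r hr
      rw [List.mem_range] at hr
      by_cases hrm : r = m
      · subst hrm
        rw [if_neg (by omega), if_pos (by omega)]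
        have hnil : nthDiff (r + 1) l2 = [] :=
          List.eq_nil_of_length_eq_zero (by rw [nthDiff_length]; omega)
        simp [padRow, hnil]
      · rcases Nat.lt_or_ge r m with hlt | hge
        · rw [if_pos hlt, if_pos (by omega : r < m + 1)]
        · rw [if_neg (by omega : ¬ r < m), if_neg (by omega : ¬ r < m + 1)]
    · have hmn : m < l2.length := by omega
      have hrow : T.getD m [] = List.replicate l1.length 0 := by
        rw [hT, getD_map_range_row _ _ _ hmn, if_neg (by omega)]
      rw [fold_set_row m
        (fun d j => ((if m = 0 then l2 else d.getD (m - 1) []).getD (j + 1) 0 -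
                     (if m = 0 then l2 else d.getD (m - 1) []).getD j 0))
        (by
          intro d r j
          by_cases hm0 : m = 0
          · simp [hm0]
          · have : (d.set m r).getD (m - 1) [] = d.getD (m - 1) [] := by
              simp [List.getD, List.getElem?_set_ne (by omega : m ≠ m - 1)]
            simp only [if_neg hm0, this])
        T l1.length (by simp [hT, hmn]) hrow (l2.length - m - 1) (by omega)]
      apply List.ext_getElem
      · simp [hT]
      · intro r hr1 hr2
        simp only [List.length_set, hT, List.length_map, List.length_range] at hr1
        rw [List.getElem_set]
        by_cases hrm : r = m
        · subst hrm
          rw [if_pos rfl]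
          simp only [List.getElem_map, List.getElem_range, if_pos (by omega : r < r + 1)]
          apply List.ext_getElem
          · simp [padRow, nthDiff_length]; omega
          · intro j hj1 hj2
            simp only [List.length_map, List.length_range] at hj1
            simp only [List.getElem_map, List.getElem_range]
            by_cases hjc : j < l2.length - r - 1
            · rw [if_pos hjc]
              have hwv := w_value l1 l2 r j hmn hjc
              rw [← hT] at hwv
              rw [hwv]
              have hjlen : j < (nthDiff (r + 1) l2).length := by
                rw [nthDiff_length]; omega
              simp only [padRow]
              rw [List.getElem_append_left hjlen]
              simp [List.getD, List.getElem?_eq_getElem hjlen]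
            · rw [if_neg hjc]
              have hjlen : (nthDiff (r + 1) l2).length ≤ j := by
                rw [nthDiff_length]; omega
              simp only [padRow]
              rw [List.getElem_append_right hjlen]
              simp
        · rw [if_neg (Ne.symm hrm)]
          simp only [hT, List.getElem_map, List.getElem_range]
          rcases Nat.lt_or_ge r m with hlt | hge
          · rw [if_pos hlt, if_pos (by omega : r < m + 1)]
          · rw [if_neg (by omega : ¬ r < m), if_neg (by omega : ¬ r < m + 1)]

lemma f_eq (l1 l2 : List Int) (h : Pre_f l1 l2) :
    f l1 l2 = (List.range l2.length).map (fun r =>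
      if r < l1.length - 1 then padRow l1.length l2 r
      else List.replicate l1.length 0) := by
  unfold f
  rw [PySem.List.pyRange_one]
  have hcast : (((l1.length : Int) - 1) - 0).toNat = l1.length - 1 := by omega
  rw [hcast, List.foldl_map]
  simp only [zero_add]
  exact f_outer l1 l2 h (l1.length - 1) le_rfl

-- ===== VERDICT (by name: the statement is the Claim_ definition above) =====
theorem f_spec : Claim_equal_f := by
  intro l1 l2 _ hpre
  unfold Spec_f
  rw [f_eq l1 l2 hpre, f_alt_eq l1 l2 hpre]
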